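-- pv_equiv track=rewrite | github.com/nhimzu123/Big-O-Blue | 08_23_21_Sorting/ex1.py | calculate_minutes
-- ===== SOURCE A (Python) =====
-- def calculate_minutes(n, x, subjects):
--     sum_minutes = 0
--     time_cost = x
--     subjects.sort()
--     for i in range(n):
--         if time_cost > 1:
--             sum_minutes += subjects[i] * time_cost
--             time_cost -= 1
--         else:
--             sum_minutes += subjects[i] * 1
--
--     return sum_minutes
-- ===== SOURCE B (Python) =====
-- def calculate_minutes(n, x, subjects):
--     subjects.sort()
--     m = max(n, 0)
--     k = min(m, max(x - 1, 0))
--     pk = 0   # running prefix sum of the first k sorted values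
--     sk = 0   # sum of those prefix sums (telescopes the decreasing weights)
--     for v in subjects[:k]:
--         pk += v
--         sk += pk
--     pn = pk + sum(subjects[k:m])
--     return pn + (x - 1 - k) * pk + sk
-- ===== Notes on version B (the rewrite author's own statement) =====
-- stated objective: alternative
-- what changed: B telescopes the decreasing weights: it keeps a running prefix sum and the sum of prefix sums over the first k = min(max(n,0), max(x-1,0)) sorted elements, so the answer is plain-sum + (x-1-k)*prefix + sum-of-prefixes, with no per-element weight multiplication or decrementing counter.
import Mathlib
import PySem

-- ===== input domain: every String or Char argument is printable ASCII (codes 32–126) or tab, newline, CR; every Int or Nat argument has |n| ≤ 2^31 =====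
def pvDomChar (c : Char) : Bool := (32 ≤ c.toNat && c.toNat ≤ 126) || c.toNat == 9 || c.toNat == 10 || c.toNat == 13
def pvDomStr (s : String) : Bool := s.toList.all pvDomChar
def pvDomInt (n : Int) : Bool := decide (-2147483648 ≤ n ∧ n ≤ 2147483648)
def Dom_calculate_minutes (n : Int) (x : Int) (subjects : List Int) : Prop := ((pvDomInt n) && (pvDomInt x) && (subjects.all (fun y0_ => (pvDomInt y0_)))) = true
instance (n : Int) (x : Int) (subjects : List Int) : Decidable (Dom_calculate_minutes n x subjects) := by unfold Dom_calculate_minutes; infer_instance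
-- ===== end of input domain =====

-- B telescopes the decreasing weights into prefix sums: one running prefix sum and the sum of all
-- prefix sums over the first k sorted elements replace the per-element weight multiplication and
-- the decrementing counter. Both A and B sort `subjects` in place; the equivalence proved here is
-- about the return value.

-- ===== PORT A =====
def calculate_minutes (n : Int) (x : Int) (subjects : List Int) : Int :=
  let s := PySem.List.sorted subjects (fun v => v) false
  ((PySem.List.pyRange 0 n 1).foldl
    (fun (st : Int × Int) i =>
      if st.2 > 1 then (st.1 + PySem.List.pyGetD s i 0 * st.2, st.2 - 1)
      else (st.1 + PySem.List.pyGetD s i 0 * 1, st.2)) (0, x)).1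

-- ===== PORT B =====
def calculate_minutes_alt (n : Int) (x : Int) (subjects : List Int) : Int :=
  let s := PySem.List.sorted subjects (fun v => v) false
  let m := max n 0
  let k := min m (max (x - 1) 0)
  let st := (PySem.List.slice s none (some k)).foldl
    (fun (q : Int × Int) v => (q.1 + v, q.2 + q.1 + v)) (0, 0)
  let pn := st.1 + (PySem.List.slice s (some k) (some m)).sum
  pn + (x - 1 - k) * st.1 + st.2

-- ===== PRECONDITION & SPEC =====
-- Pre_ : the indices 0..n-1 that A reads must exist (Python raises IndexError when n > len(subjects))
def Pre_calculate_minutes (n : Int) (x : Int) (subjects : List Int) : Prop :=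
  n ≤ (subjects.length : Int)
instance (n : Int) (x : Int) (subjects : List Int) : Decidable (Pre_calculate_minutes n x subjects) := by unfold Pre_calculate_minutes; infer_instance

def pvWitness_calculate_minutes : Int × Int × List Int := (3, 4, [5, 1, 2])

def Spec_calculate_minutes (n : Int) (x : Int) (subjects : List Int) (out : Int) : Prop := out = calculate_minutes_alt n x subjects
instance (n : Int) (x : Int) (subjects : List Int) (out : Int) : Decidable (Spec_calculate_minutes n x subjects out) := by unfold Spec_calculate_minutes; infer_instance

-- ===== CLAIM =====
def Claim_equal_calculate_minutes : Prop := ∀ (n : Int) (x : Int) (subjects : List Int), Dom_calculate_minutes n x subjects → Pre_calculate_minutes n x subjects → Spec_calculate_minutes n x subjects (calculate_minutes n x subjects)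

-- ===== LEMMAS AND PROOFS =====

-- time_cost entering the iteration for index a (a ≥ 0)
def pvTc (x a : Int) : Int := if x ≤ 1 then x else max (x - a) 1

-- A's loop computes the sum of g i * max (x - i) 1 over the range
theorem pvA_loop (g : Int → Int) (x : Int) : ∀ (m : Nat) (a acc : Int), 0 ≤ a →
    ((PySem.List.pyRange a (a + m) 1).foldl
      (fun (st : Int × Int) i =>
        if st.2 > 1 then (st.1 + g i * st.2, st.2 - 1)
        else (st.1 + g i * 1, st.2)) (acc, pvTc x a)).1
    = acc + ((PySem.List.pyRange a (a + m) 1).map (fun i => g i * max (x - i) 1)).sum := by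
  intro m
  induction m with
  | zero => intro a acc _; rw [PySem.List.pyRange_one_eq_nil (by omega : a + ((0:Nat):Int) ≤ a)]; simp
  | succ m ih =>
    intro a acc ha
    rw [PySem.List.pyRange_one_cons (by push_cast; omega : a < a + ((m:Nat)+1:Nat))]
    simp only [List.foldl_cons, List.map_cons, List.sum_cons]
    have hrange : a + ((m:Nat)+1:Nat) = (a+1) + (m:Nat) := by push_cast; omega
    by_cases hx : x ≤ 1
    · have htc : pvTc x a = x := by simp [pvTc, hx]
      have h1 : ¬ (pvTc x a > 1) := by omega
      rw [if_neg h1, htc]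
      rw [hrange]
      have := ih (a + 1) (acc + g a * 1) (by omega)
      simp [pvTc, hx] at this ⊢
      rw [this]
      have hm : max (x - a) 1 = 1 := by omega
      rw [hm]; ring
    · by_cases hgt : x - a > 1
      · have htc : pvTc x a = x - a := by simp [pvTc, hx]; omega
        rw [htc, if_pos (by omega)]
        rw [hrange]
        have htc' : pvTc x (a + 1) = x - a - 1 := by simp [pvTc, hx]; omega
        have := ih (a + 1) (acc + g a * (x - a)) (by omega)
        rw [htc'] at this
        rw [this]
        have hm : max (x - a) 1 = x - a := by omega
        rw [hm]; ring
      · have htc : pvTc x a = 1 := by simp [pvTc, hx]; omega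
        rw [htc, if_neg (by omega)]
        rw [hrange]
        have htc' : pvTc x (a + 1) = 1 := by simp [pvTc, hx]; omega
        have := ih (a + 1) (acc + g a * 1) (by omega)
        rw [htc'] at this
        rw [this]
        have hm : max (x - a) 1 = 1 := by omega
        rw [hm]; ring

theorem pvA_closed (g : Int → Int) (n x : Int) :
    ((PySem.List.pyRange 0 n 1).foldl
      (fun (st : Int × Int) i =>
        if st.2 > 1 then (st.1 + g i * st.2, st.2 - 1)
        else (st.1 + g i * 1, st.2)) (0, x)).1
    = ((PySem.List.pyRange 0 n 1).map (fun i => g i * max (x - i) 1)).sum := by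
  by_cases hn : n ≤ 0
  · simp [PySem.List.pyRange_one_eq_nil hn]
  · have hx0 : pvTc x 0 = x := by
      simp [pvTc]; intro h; omega
    have := pvA_loop g x n.toNat 0 0 (le_refl 0)
    rw [hx0] at this
    have hn' : (0:Int) + (n.toNat : Int) = n := by omega
    rw [hn'] at this
    simpa using this

-- F u x = the intended weighted sum: head weighted max x 1, tail with x-1  (structural spec of A)
def pvF : List Int → Int → Int
  | [], _ => 0
  | a :: t, x => a * max x 1 + pvF t (x - 1)

-- T t = sum over i of t[i] * (|t| - i) = the sum of all prefix sums of t
def pvT : List Int → Int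
  | [] => 0
  | a :: t => a * ((t.length : Int) + 1) + pvT t

theorem pvFoldPS : ∀ (t : List Int) (p sAcc : Int),
    t.foldl (fun (q : Int × Int) v => (q.1 + v, q.2 + q.1 + v)) (p, sAcc)
    = (p + t.sum, sAcc + (t.length : Int) * p + pvT t) := by
  intro t
  induction t with
  | nil => intro p sAcc; simp [pvT]
  | cons a t ih =>
    intro p sAcc
    simp only [List.foldl_cons]
    rw [ih]
    simp only [List.sum_cons, List.length_cons, pvT, Prod.mk.injEq]
    constructor <;> (push_cast; ring)

theorem pvF_append : ∀ (t r : List Int) (x : Int),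
    pvF (t ++ r) x = pvF t x + pvF r (x - (t.length : Int)) := by
  intro t
  induction t with
  | nil => intro r x; simp [pvF]
  | cons a t ih =>
    intro r x
    simp only [List.cons_append, pvF, List.length_cons, ih]
    push_cast; ring_nf

theorem pvF_ge : ∀ (t : List Int) (x : Int), (t.length : Int) + 1 ≤ x →
    pvF t x = (x - 1 - (t.length : Int)) * t.sum + pvT t + t.sum := by
  intro t
  induction t with
  | nil => intro x _; simp [pvF, pvT]
  | cons a t ih =>
    intro x hx
    simp only [List.length_cons] at hx ⊢
    have hL : ((t.length : Int) + 1) + 1 ≤ x := by push_cast at hx ⊢; omega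
    simp only [pvF, pvT, List.sum_cons]
    rw [ih (x - 1) (by omega)]
    have hm : max x 1 = x := by omega
    rw [hm]; push_cast; ring

theorem pvF_le_one : ∀ (t : List Int) (x : Int), x ≤ 1 → pvF t x = t.sum := by
  intro t
  induction t with
  | nil => intro x _; simp [pvF]
  | cons a t ih =>
    intro x hx
    simp only [pvF, List.sum_cons]
    rw [ih (x - 1) (by omega)]
    have hm : max x 1 = 1 := by omega
    rw [hm]; ring

-- A's index-weighted range sum equals the structural spec pvF on the list itself
theorem pvSum_range_eq_F : ∀ (u : List Int) (x : Int),
    ((List.range u.length).map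
      (fun kk : Nat => PySem.List.pyGetD u (kk : Int) 0 * max (x - (kk : Int)) 1)).sum
    = pvF u x := by
  intro u
  induction u with
  | nil => intro x; simp [pvF]
  | cons a t ih =>
    intro x
    have key : (List.range (a :: t).length).map
        (fun kk : Nat => PySem.List.pyGetD (a :: t) (kk : Int) 0 * max (x - (kk : Int)) 1)
        = (a * max x 1)
          :: (List.range t.length).map
            (fun kk : Nat => PySem.List.pyGetD t (kk : Int) 0 * max ((x - 1) - (kk : Int)) 1) := by
      rw [List.length_cons, List.range_succ_eq_map, List.map_cons, List.map_map]
      congr 1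
      · have h0 : PySem.List.pyGetD (a :: t) (((0 : Nat) : Int)) 0 = a := by
          rw [PySem.List.pyGetD_natCast]; rfl
        simpa using congrArg (fun z => z * max (x - ((0:Nat):Int)) 1) h0
      · apply List.map_congr_left
        intro kk _
        show PySem.List.pyGetD (a :: t) (((kk + 1 : Nat) : Int)) 0 * max (x - ((kk + 1 : Nat) : Int)) 1 = _
        have h1 : PySem.List.pyGetD (a :: t) (((kk + 1 : Nat) : Int)) 0
            = PySem.List.pyGetD t ((kk : Nat) : Int) 0 := by
          rw [PySem.List.pyGetD_natCast, PySem.List.pyGetD_natCast, List.getD_cons_succ]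
        rw [h1]
        congr 1
        push_cast; ring_nf
    rw [key, List.sum_cons, ih (x - 1)]
    rfl

-- ===== VERDICT helper: the main equality =====
theorem calculate_minutes_spec : Claim_equal_calculate_minutes := by
  intro n x subjects _ hpre
  simp only [Spec_calculate_minutes, calculate_minutes, calculate_minutes_alt]
  set s := PySem.List.sorted subjects (fun v => v) false with hs
  have hlen : s.length = subjects.length := PySem.List.length_sorted ..
  have hns : n ≤ (s.length : Int) := by rw [hlen]; exact hpre
  set m := max n 0 with hm
  set k := min m (max (x - 1) 0) with hk
  have hk0 : 0 ≤ k := by omega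
  have hkm : k ≤ m := by omega
  have hms : m ≤ (s.length : Int) := by omega
  -- slices to take/drop
  have hsl1 : PySem.List.slice s none (some k) = s.take k.toNat :=
    PySem.List.slice_to s hk0
  have hsl2 : PySem.List.slice s (some k) (some m)
      = (s.drop k.toNat).take (m.toNat - k.toNat) :=
    PySem.List.slice_toNat s hk0 (by omega)
  set t := s.take k.toNat with ht
  set r := (s.drop k.toNat).take (m.toNat - k.toNat) with hr
  have htlen : t.length = k.toNat := by
    rw [ht, List.length_take]; omega
  have hrlen : r.length = m.toNat - k.toNat := by
    rw [hr, List.length_take, List.length_drop]; omega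
  have htr : t ++ r = s.take m.toNat := by
    rw [ht, hr, ← List.take_add]
    congr 1; omega
  rw [hsl1, hsl2, pvFoldPS]
  simp only [zero_add, add_zero, mul_zero]
  -- reduce A's fold to pvF (s.take m.toNat) x
  have hA : ((PySem.List.pyRange 0 n 1).foldl
      (fun (st : Int × Int) i =>
        if st.2 > 1 then (st.1 + PySem.List.pyGetD s i 0 * st.2, st.2 - 1)
        else (st.1 + PySem.List.pyGetD s i 0 * 1, st.2)) (0, x)).1
      = pvF (s.take m.toNat) x := by
    rw [pvA_closed]
    by_cases hn : n ≤ 0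
    · have hm0 : m = 0 := by omega
      rw [PySem.List.pyRange_one_eq_nil hn, hm0]
      simp [pvF]
    · have hnm : n = m := by omega
      rw [hnm, ← pvSum_range_eq_F (s.take m.toNat) x, PySem.List.pyRange_one 0 m, List.map_map]
      have hlen' : (s.take m.toNat).length = m.toNat := by
        rw [List.length_take]; omega
      rw [hlen']
      have hmn : (m - 0).toNat = m.toNat := by omega
      rw [hmn]
      apply congrArg List.sum
      apply List.map_congr_left
      intro kk hkk
      rw [List.mem_range] at hkk
      show PySem.List.pyGetD s (0 + (kk : Int)) 0 * max (x - (0 + (kk : Int))) 1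
        = PySem.List.pyGetD (List.take m.toNat s) (kk : Int) 0 * max (x - (kk : Int)) 1
      rw [zero_add]
      congr 1
      rw [PySem.List.pyGetD_natCast, PySem.List.pyGetD_natCast,
        List.getD_eq_getElem?_getD, List.getD_eq_getElem?_getD, List.getElem?_take]
      rw [if_pos hkk]
  have hkcast : ((k.toNat : Nat) : Int) = k := by omega
  rw [hA, ← htr, pvF_append, htlen, hkcast]
  by_cases hx : x ≤ 1
  · have hk0' : k = 0 := by omega
    have htnil : t = [] := by rw [ht, hk0']; simp
    rw [htnil, hk0', pvF_le_one r (x - 0) (by omega)]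
    simp [pvF, pvT]
  · by_cases hkx : x - 1 ≤ m
    · have hkeq : k = x - 1 := by omega
      rw [pvF_le_one r (x - k) (by omega)]
      rw [pvF_ge t x (by rw [htlen]; omega)]
      rw [htlen, hkcast]
      ring
    · -- k = m < x - 1, so r = []
      have hkeq : k = m := by omega
      have hrnil : r = [] := by
        rw [hr]
        have h0 : m.toNat - k.toNat = 0 := by omega
        rw [h0, List.take_zero]
      rw [hrnil, pvF_ge t x (by rw [htlen]; omega)]
      rw [htlen, hkcast]
      simp only [pvF, List.sum_nil]
      ring
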